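-- pv_equiv track=rewrite | github.com/HoyiTT/Problem_Solving | PYTHON/프로그래머스/LV0/120899.py | solution
-- ===== SOURCE A (Python) =====
-- def solution(array):
--     a = max(array)
--     b = 0
--     for i in range(0, len(array)):
--         if array[i] == a:
--             b = i
--     answer = [a, b]
--     return answer
-- ===== SOURCE B (Python) =====
-- def solution(array):
--     # Single pass: maintain running max and its last index (>= keeps the last tie).
--     if not array:
--         raise ValueError("max() arg is an empty sequence")
--     a = array[0]
--     b = 0
--     for i, v in enumerate(array[1:], 1):
--         if v >= a:
--             a, b = v, i
--     return [a, b]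
-- ===== Notes on version B (the rewrite author's own statement) =====
-- stated objective: simpler
-- what changed: B computes the max and its last index in one traversal (running max with >= keeping the last tie) instead of calling max() and then rescanning by index.
import Mathlib
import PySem

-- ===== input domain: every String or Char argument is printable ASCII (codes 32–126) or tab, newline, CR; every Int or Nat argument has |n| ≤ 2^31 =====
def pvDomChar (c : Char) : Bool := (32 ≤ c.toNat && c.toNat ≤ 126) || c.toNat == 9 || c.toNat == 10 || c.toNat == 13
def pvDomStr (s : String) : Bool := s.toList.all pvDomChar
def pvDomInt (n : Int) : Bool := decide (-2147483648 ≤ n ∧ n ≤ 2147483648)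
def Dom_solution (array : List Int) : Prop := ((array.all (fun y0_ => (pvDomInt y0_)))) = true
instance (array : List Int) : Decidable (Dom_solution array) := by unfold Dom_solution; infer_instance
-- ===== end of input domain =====

-- B computes the max and its last index in one traversal (running max, >= keeps the last tie)
-- instead of A's max() call followed by a second index scan; the empty list (both raise ValueError) is outside Pre_.


-- ===== PORT A =====
def solution (array : List Int) : List Int :=
  match PySem.List.max? array (fun y => y) with
  | none => []  -- unreachable under Pre_: Python's max([]) raises ValueError
  | some a =>
    let b := (PySem.List.pyRange 0 array.length 1).foldl
      (fun b i => if PySem.List.pyGetD array i 0 = a then i else b) 0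
    [a, b]

-- ===== PORT B =====
def solution_alt (array : List Int) : List Int :=
  match array with
  | [] => []  -- unreachable under Pre_: Python B raises ValueError here
  | x :: xs =>
    let s := (PySem.List.enumerate xs 1).foldl
      (fun (s : Int × Int) (p : Int × Int) => if s.1 ≤ p.2 then (p.2, p.1) else s) (x, 0)
    [s.1, s.2]

-- ===== PRECONDITION & SPEC =====
-- Pre_ excludes only the empty list, on which both Pythons raise ValueError.
def Pre_solution (array : List Int) : Prop := array ≠ []
instance (array : List Int) : Decidable (Pre_solution array) := by unfold Pre_solution; infer_instance
def pvWitness_solution : List Int := [3, 7, 7, 1]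
def Spec_solution (array : List Int) (out : List Int) : Prop := out = solution_alt array
instance (array : List Int) (out : List Int) : Decidable (Spec_solution array out) := by unfold Spec_solution; infer_instance

-- ===== CLAIM (what is proved, stated in full; the proofs are below) =====
def Claim_equal_solution : Prop := ∀ (array : List Int), Dom_solution array → Pre_solution array → Spec_solution array (solution array)

-- ===== LEMMAS AND PROOFS =====

def bfold (l : List Int) (a : Int) : Int :=
  (PySem.List.pyRange 0 l.length 1).foldl
    (fun b i => if PySem.List.pyGetD l i 0 = a then i else b) 0

def runB (x : Int) (xs : List Int) : Int × Int :=
  (PySem.List.enumerate xs 1).foldl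
    (fun (s : Int × Int) (p : Int × Int) => if s.1 ≤ p.2 then (p.2, p.1) else s) (x, 0)

lemma bfold_prefix (l : List Int) (v a : Int) :
    (PySem.List.pyRange 0 l.length 1).foldl
      (fun b i => if PySem.List.pyGetD (l ++ [v]) i 0 = a then i else b) 0
    = bfold l a := by
  unfold bfold
  refine PySem.List.foldl_congr_mem _ _ _ _ (fun acc i hi => ?_)
  have hm := (PySem.List.mem_pyRange_one).1 hi
  have h1 : PySem.List.pyGetD (l ++ [v]) i 0 = l[i.toNat]'(by omega) := by
    rw [PySem.List.pyGetD_eq_getElem _ 0 hm.1 (by simp; omega)]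
    exact List.getElem_append_left _
  have h2 : PySem.List.pyGetD l i 0 = l[i.toNat]'(by omega) :=
    PySem.List.pyGetD_eq_getElem _ 0 hm.1 (by omega)
  rw [h1, h2]

lemma runB_eq (xs : List Int) (x : Int) :
    runB x xs = (xs.foldl max x, bfold (x :: xs) (xs.foldl max x)) := by
  induction xs using List.reverseRecOn with
  | nil =>
      have h1 : PySem.List.pyRange 0 1 = [0] := by decide
      simp [runB, bfold, h1, PySem.List.pyGetD_zero_cons]
  | append_singleton ys v ih =>
      have hcons : (x :: (ys ++ [v])) = (x :: ys) ++ [v] := by simp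
      have hrange : PySem.List.pyRange 0 (((x :: (ys ++ [v])) : List Int).length : Int)
          = PySem.List.pyRange 0 (((x :: ys) : List Int).length : Int) ++ [(((x :: ys) : List Int).length : Int)] := by
        have : (((x :: (ys ++ [v])) : List Int).length : Int) = (((x :: ys) : List Int).length : Int) + 1 := by
          simp
        rw [this]
        exact PySem.List.pyRange_one_succ_right (by positivity)
      have hget : PySem.List.pyGetD (x :: (ys ++ [v])) (((x :: ys) : List Int).length : Int) 0 = v := by
        rw [PySem.List.pyGetD_natCast]
        simp
      have hrun : runB x (ys ++ [v]) =
          (if (runB x ys).1 ≤ v then (v, (1 + ys.length : Int)) else runB x ys) := by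
        unfold runB
        rw [PySem.List.enumerate_append, List.foldl_append]
        simp [PySem.List.enumerate]
      have hmax : (ys ++ [v]).foldl max x = max (ys.foldl max x) v := by simp
      set m := ys.foldl max x with hm
      have hbf : ∀ a : Int, bfold (x :: (ys ++ [v])) a =
          (if v = a then (((x :: ys) : List Int).length : Int)
           else (PySem.List.pyRange 0 (((x :: ys) : List Int).length : Int) 1).foldl
             (fun b i => if PySem.List.pyGetD (x :: (ys ++ [v])) i 0 = a then i else b) 0) := by
        intro a
        unfold bfold
        rw [hrange, List.foldl_append]
        simp only [List.foldl_cons, List.foldl_nil, hget]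
      have hlen : (((x :: ys) : List Int).length : Int) = (ys.length : Int) + 1 := by push_cast [List.length_cons]; ring
      by_cases h : m ≤ v
      · have hm' : max m v = v := by omega
        rw [hrun, ih, hmax, hm', hbf]
        simp [h]
        omega
      · have hm' : max m v = m := by omega
        have hne : ¬ (v = m) := by omega
        rw [hrun, ih, hmax, hm', hbf]
        have hpre : (PySem.List.pyRange 0 (((x :: ys) : List Int).length : Int) 1).foldl
             (fun b i => if PySem.List.pyGetD (x :: (ys ++ [v])) i 0 = m then i else b) 0 = bfold (x :: ys) m := by
          rw [show (x :: (ys ++ [v])) = (x :: ys) ++ [v] from hcons]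
          exact bfold_prefix (x :: ys) v m
        rw [hlen] at hpre
        simp [hne, h]
        exact hpre.symm

lemma solution_char (x : Int) (xs : List Int) :
    solution (x :: xs) = [xs.foldl max x, bfold (x :: xs) (xs.foldl max x)] := by
  simp [solution, PySem.List.max?_id_cons, bfold]

lemma solution_alt_char (x : Int) (xs : List Int) :
    solution_alt (x :: xs) = [(runB x xs).1, (runB x xs).2] := by
  simp [solution_alt, runB]

-- ===== VERDICT (by name: the statement is the Claim_ definition above) =====
theorem solution_spec : Claim_equal_solution := by
  intro array _ hpre
  cases array with
  | nil => exact absurd rfl hpre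
  | cons x xs =>
      show solution (x :: xs) = solution_alt (x :: xs)
      rw [solution_char, solution_alt_char, runB_eq]
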